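-- pv_equiv track=rewrite | github.com/nhatanh20022005/DO-AN-CA-NHA_-8-QUAN-XE | bk.py | kiem_tra_rang_buoc
-- ===== SOURCE A (Python) =====
-- import itertools
--
-- def kiem_tra_rang_buoc(assignments):
--     values = list(assignments.values())
--
--     if len(values) != len(set(values)):
--         return False
--
--     for (r1, c1), (r2, c2) in itertools.combinations(values, 2):
--         if r1 == r2 or c1 == c2:
--             return False
--     return True
-- ===== SOURCE B (Python) =====
-- def _has_adjacent_dup(xs):
--     for i in range(1, len(xs)):
--         if xs[i] == xs[i - 1]:
--             return True
--     return False
--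
--
-- def kiem_tra_rang_buoc(assignments):
--     vals = list(assignments.values())
--     rows = sorted(v[0] for v in vals)
--     cols = sorted(v[1] for v in vals)
--     return not _has_adjacent_dup(rows) and not _has_adjacent_dup(cols)
-- ===== Notes on version B (the rewrite author's own statement) =====
-- stated objective: alternative
-- what changed: Replaces the set-size duplicate test plus the quadratic scan over all itertools.combinations pairs by sorting the row and column coordinates separately and scanning each sorted list once for an adjacent equal pair.
import Mathlib
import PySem

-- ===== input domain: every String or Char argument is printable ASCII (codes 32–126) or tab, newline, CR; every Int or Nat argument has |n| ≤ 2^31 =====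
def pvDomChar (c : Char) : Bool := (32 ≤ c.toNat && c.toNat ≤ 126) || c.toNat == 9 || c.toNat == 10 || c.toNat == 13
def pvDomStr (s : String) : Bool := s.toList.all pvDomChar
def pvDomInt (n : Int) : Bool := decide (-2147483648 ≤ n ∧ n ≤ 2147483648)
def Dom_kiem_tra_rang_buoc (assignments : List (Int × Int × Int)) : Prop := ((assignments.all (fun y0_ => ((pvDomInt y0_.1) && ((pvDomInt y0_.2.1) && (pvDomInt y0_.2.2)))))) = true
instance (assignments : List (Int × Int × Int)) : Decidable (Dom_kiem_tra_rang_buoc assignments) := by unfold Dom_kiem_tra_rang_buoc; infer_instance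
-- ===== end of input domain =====

-- ===== PORT A =====
-- B replaces the set-size duplicate test and quadratic pairwise scan by two sort-then-adjacent-scan passes.
def pyCombinations2 {a : Type} (xs : List a) : List (a × a) :=
  match xs with
  | [] => []
  | x :: rest => rest.map (fun y => (x, y)) ++ pyCombinations2 rest

def kiem_tra_rang_buoc (assignments : List (Int × Int × Int)) : Bool :=
  let values := (PySem.Dict.ofList assignments).values
  if PySem.List.len values != PySem.Set.len (PySem.Set.ofList values) then false
  else (pyCombinations2 values).all (fun p => !(p.1.1 == p.2.1 || p.1.2 == p.2.2))

-- ===== PORT B =====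
def hasAdjDup (xs : List Int) : Bool :=
  (PySem.List.pyRange 1 (PySem.List.len xs) 1).any
    (fun i => PySem.List.pyGetD xs i 0 == PySem.List.pyGetD xs (i - 1) 0)

def kiem_tra_rang_buoc_alt (assignments : List (Int × Int × Int)) : Bool :=
  let vals := (PySem.Dict.ofList assignments).values
  let rows := PySem.List.sorted (vals.map (fun v => v.1)) (fun x => x) false
  let cols := PySem.List.sorted (vals.map (fun v => v.2)) (fun x => x) false
  !hasAdjDup rows && !hasAdjDup cols

-- ===== PRECONDITION & SPEC =====
def Spec_kiem_tra_rang_buoc (assignments : List (Int × Int × Int)) (out : Bool) : Prop := out = kiem_tra_rang_buoc_alt assignments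
instance (assignments : List (Int × Int × Int)) (out : Bool) : Decidable (Spec_kiem_tra_rang_buoc assignments out) := by unfold Spec_kiem_tra_rang_buoc; infer_instance

-- ===== CLAIM (what is proved, stated in full; the proofs are below) =====
def Claim_equal_kiem_tra_rang_buoc : Prop := ∀ (assignments : List (Int × Int × Int)), Dom_kiem_tra_rang_buoc assignments → Spec_kiem_tra_rang_buoc assignments (kiem_tra_rang_buoc assignments)

-- ===== LEMMAS AND PROOFS =====

lemma comb_all :
    ∀ xs : List (Int × Int),
      ((pyCombinations2 xs).all (fun p => !(p.1.1 == p.2.1 || p.1.2 == p.2.2)) = true ↔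
        xs.Pairwise (fun a b => a.1 ≠ b.1 ∧ a.2 ≠ b.2))
  | [] => by simp [pyCombinations2]
  | x :: rest => by
      simp only [pyCombinations2, List.all_append, Bool.and_eq_true, List.pairwise_cons]
      rw [comb_all rest]
      apply and_congr _ Iff.rfl
      simp [List.all_map, List.all_eq_true]

lemma hasAdjDup_false_iff (xs : List Int) :
    hasAdjDup xs = false ↔ ∀ (i : Nat) (h : i + 1 < xs.length), xs[i + 1] ≠ xs[i] := by
  unfold hasAdjDup
  rw [List.any_eq_false]
  constructor
  · intro H i h heq
    have hm : ((i : Int) + 1) ∈ PySem.List.pyRange 1 (PySem.List.len xs) 1 := by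
      rw [PySem.List.mem_pyRange_one]
      simp only [PySem.List.len_eq]
      omega
    have hne := H _ hm
    apply hne
    have c1 : PySem.List.pyGetD xs ((i : Int) + 1) 0 = xs[i + 1] := by
      have hc : ((i : Int) + 1) = ((i + 1 : Nat) : Int) := by omega
      rw [hc, PySem.List.pyGetD_natCast, List.getD_eq_getElem _ _ h]
    have c2 : PySem.List.pyGetD xs ((i : Int) + 1 - 1) 0 = xs[i] := by
      have hc : ((i : Int) + 1 - 1) = ((i : Nat) : Int) := by omega
      rw [hc, PySem.List.pyGetD_natCast, List.getD_eq_getElem _ _ (by omega)]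
    rw [c1, c2, heq]
    exact beq_self_eq_true _
  · intro H i hm hp
    rw [PySem.List.mem_pyRange_one] at hm
    simp only [PySem.List.len_eq] at hm
    obtain ⟨h1, h2⟩ := hm
    obtain ⟨j, hji, hjl⟩ : ∃ j : Nat, i = (j : Int) + 1 ∧ j + 1 < xs.length :=
      ⟨(i - 1).toNat, by omega, by omega⟩
    have c1 : PySem.List.pyGetD xs i 0 = xs[j + 1] := by
      have hc : i = ((j + 1 : Nat) : Int) := by omega
      rw [hc, PySem.List.pyGetD_natCast, List.getD_eq_getElem _ _ hjl]
    have c2 : PySem.List.pyGetD xs (i - 1) 0 = xs[j] := by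
      have hc : i - 1 = ((j : Nat) : Int) := by omega
      rw [hc, PySem.List.pyGetD_natCast, List.getD_eq_getElem _ _ (by omega)]
    rw [c1, c2] at hp
    exact H j hjl (by simpa using hp)

lemma sorted_scan_iff_nodup (xs : List Int) :
    hasAdjDup (PySem.List.sorted xs (fun x => x) false) = false ↔ xs.Nodup := by
  set ys := PySem.List.sorted xs (fun x => x) false with hys
  have hperm : ys.Perm xs := PySem.List.sorted_perm xs (fun x => x) false
  have hpw : ys.Pairwise (· ≤ ·) := by
    have := PySem.List.sorted_pairwise xs (fun x => x) (κ := Int)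
    simpa [hys] using this
  rw [hasAdjDup_false_iff, ← hperm.nodup_iff]
  constructor
  · intro H
    have hch : ys.IsChain (· < ·) := by
      rw [List.isChain_iff_getElem]
      intro i h
      have hle : ys[i] ≤ ys[i + 1] :=
        (List.isChain_iff_getElem).1 hpw.isChain i h
      have hne := H i h
      omega
    exact hch.pairwise.imp (fun h => ne_of_lt h)
  · intro H i h heq
    have := (List.Nodup.getElem_inj_iff H).1 heq
    omega

lemma pairwise_fst_snd (vals : List (Int × Int)) :
    (vals.Nodup ∧ vals.Pairwise (fun a b => a.1 ≠ b.1 ∧ a.2 ≠ b.2)) ↔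
      ((vals.map (fun v => v.1)).Nodup ∧ (vals.map (fun v => v.2)).Nodup) := by
  simp only [List.Nodup, List.pairwise_map]
  constructor
  · rintro ⟨-, hpw⟩
    exact ⟨hpw.imp (fun h => h.1), hpw.imp (fun h => h.2)⟩
  · rintro ⟨h1, h2⟩
    refine ⟨?_, h1.and h2⟩
    exact h1.imp (fun h he => h (by rw [he]))

lemma set_len_eq_iff (xs : List (Int × Int)) :
    (PySem.Set.ofList xs).length = xs.length ↔ xs.Nodup := by
  have hp : (PySem.Set.ofList xs).Perm xs.dedup := by
    apply (List.perm_ext_iff_of_nodup (PySem.Set.nodup_ofList xs) xs.nodup_dedup).2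
    intro a
    rw [PySem.Set.mem_ofList, List.mem_dedup]
  rw [hp.length_eq]
  constructor
  · intro h
    rw [← List.dedup_eq_self]
    exact xs.dedup_sublist.eq_of_length h
  · intro h
    rw [List.dedup_eq_self.2 h]

lemma main_eq (vals : List (Int × Int)) :
    ((if PySem.List.len vals != PySem.Set.len (PySem.Set.ofList vals) then false
      else (pyCombinations2 vals).all (fun p => !(p.1.1 == p.2.1 || p.1.2 == p.2.2))) =
      (!hasAdjDup (PySem.List.sorted (vals.map (fun v => v.1)) (fun x => x) false) &&
       !hasAdjDup (PySem.List.sorted (vals.map (fun v => v.2)) (fun x => x) false))) := by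
  rw [Bool.eq_iff_iff]
  simp only [Bool.and_eq_true, Bool.not_eq_true', sorted_scan_iff_nodup]
  rw [← pairwise_fst_snd]
  by_cases hd : vals.Nodup
  · have hlen : (PySem.List.len vals != PySem.Set.len (PySem.Set.ofList vals)) = false := by
      simp [PySem.List.len, PySem.Set.len, (set_len_eq_iff vals).2 hd]
    rw [hlen]
    simp only [Bool.false_eq_true, if_false]
    rw [comb_all]
    constructor
    · intro h
      exact ⟨hd, h⟩
    · rintro ⟨-, h⟩
      exact h
  · have hlen : (PySem.List.len vals != PySem.Set.len (PySem.Set.ofList vals)) = true := by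
      have hne : (PySem.Set.ofList vals).length ≠ vals.length := fun h => hd ((set_len_eq_iff vals).1 h)
      simp only [PySem.List.len, PySem.Set.len, bne_iff_ne, ne_eq, Int.natCast_inj]
      omega
    rw [hlen]
    simp only [if_true]
    constructor
    · intro h
      exact absurd h (by simp)
    · rintro ⟨h, -⟩
      exact absurd h hd

-- ===== VERDICT (by name: the statement is the Claim_ definition above) =====
theorem kiem_tra_rang_buoc_spec : Claim_equal_kiem_tra_rang_buoc := by
  intro assignments _
  unfold Spec_kiem_tra_rang_buoc kiem_tra_rang_buoc kiem_tra_rang_buoc_alt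
  exact main_eq ((PySem.Dict.ofList assignments).values)
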